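-- pv_equiv track=rewrite | github.com/RodrigoSantosGoncalves1991/Desafios-do-Hackerrank---ProjectEuler- | Project Euler 11 Largest product in a grid/Project Euler 11 Largest product in a grid.py | biggestProductSeries
-- ===== SOURCE A (Python) =====
-- def biggestProductSeries(number, k):
--     numberString = number
--     counterProduct = 0
--     iCounter = 0
--     pivot = iCounter
--     product = 1
--     maxProduct = 0
--     for i in numberString:
--         if (i == 0):
--             counterProduct = 0
--             product = 1
--             iCounter = iCounter + 1
--             continue
--         if (counterProduct == 0):
--             pivot = iCounter
--         if (counterProduct < k):
--             product = product * i
--             counterProduct = counterProduct + 1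
--             if (counterProduct == k):
--                 if (product > maxProduct):
--                     maxProduct = product
--         else:
--             product = product // numberString[pivot]
--             product = product * i
--             pivot = pivot + 1
--             if (product > maxProduct):
--                 maxProduct = product
--         iCounter = iCounter + 1
--     return maxProduct
-- ===== SOURCE B (Python) =====
-- def biggestProductSeries(number, k):
--     best = 0
--     for i in range(len(number) - k + 1):
--         w = number[i:i+k]
--         if 0 in w:
--             continue
--         p = 1
--         for x in w:
--             p *= x
--         if p > best:
--             best = p
--     return best
-- ===== Notes on version B (the rewrite author's own statement) =====
-- stated objective: simpler
-- what changed: Replaces A's sliding running product (with floor-division carry of the departing element and pivot/counter bookkeeping) by a direct loop over window start indices that recomputes each zero-free window's product from scratch.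
-- outside the precondition, e.g. on biggestProductSeries([2, 3], 0): A returns 0, B returns 1; on biggestProductSeries([2, 3], -1): A returns 0, B returns 2
import Mathlib
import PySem

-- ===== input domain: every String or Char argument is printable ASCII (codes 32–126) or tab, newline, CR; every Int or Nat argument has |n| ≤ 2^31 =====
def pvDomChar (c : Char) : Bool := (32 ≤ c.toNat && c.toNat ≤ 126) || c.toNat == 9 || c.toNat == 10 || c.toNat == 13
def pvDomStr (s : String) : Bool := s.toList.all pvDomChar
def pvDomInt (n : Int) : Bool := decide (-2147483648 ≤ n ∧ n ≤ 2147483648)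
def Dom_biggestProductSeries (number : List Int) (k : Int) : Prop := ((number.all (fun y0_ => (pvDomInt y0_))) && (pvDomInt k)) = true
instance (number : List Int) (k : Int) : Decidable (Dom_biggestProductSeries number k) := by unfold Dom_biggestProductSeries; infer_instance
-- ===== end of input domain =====

-- B replaces A's sliding running product (divide-out carry + pivot/counter bookkeeping)
-- by a plain loop recomputing each zero-free window's product; simpler, same results for k >= 1.


-- ===== PORT A =====
-- state: (counterProduct, iCounter, pivot, product, maxProduct)
-- number[pivot] is ported as pyGetD with default 0: inside Pre_ the pivot is always in range
-- (the invariant in the lemmas below shows it), so Python's IndexError cannot occur.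
def stepA (number : List Int) (k : Int) (st : Int × Int × Int × Int × Int) (i : Int) :
    Int × Int × Int × Int × Int :=
  match st with
  | (cp, ic, piv, prod, maxP) =>
    if i = 0 then (0, ic + 1, piv, 1, maxP)
    else
      let piv := if cp = 0 then ic else piv
      if cp < k then
        let prod := prod * i
        let cp := cp + 1
        let maxP := if cp = k then (if prod > maxP then prod else maxP) else maxP
        (cp, ic + 1, piv, prod, maxP)
      else
        let prod := PySem.Int.floordiv prod (PySem.List.pyGetD number piv 0)
        let prod := prod * i
        let maxP := if prod > maxP then prod else maxP
        (cp, ic + 1, piv + 1, prod, maxP)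

def biggestProductSeries (number : List Int) (k : Int) : Int :=
  (number.foldl (stepA number k) (0, 0, 0, 1, 0)).2.2.2.2

-- ===== PORT B =====
def biggestProductSeries_alt (number : List Int) (k : Int) : Int :=
  (PySem.List.pyRange 0 ((number.length : Int) - k + 1) 1).foldl
    (fun best i =>
      let w := PySem.List.slice number (some i) (some (i + k))
      if w.contains 0 then best
      else
        let p := w.foldl (fun p x => p * x) 1
        if p > best then p else best) 0

-- ===== PRECONDITION & SPEC =====
-- Pre_ excludes k ≤ 0, a degenerate window length no caller would use: there A's floor-division
-- carry loop still returns an accidental value (e.g. 0 on ([2,3], 0)) while B returns the empty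
-- product 1 (and for k < 0 B's slices wrap); both behaviours are artefacts, neither is specified.
def Pre_biggestProductSeries (number : List Int) (k : Int) : Prop := 1 ≤ k
instance (number : List Int) (k : Int) : Decidable (Pre_biggestProductSeries number k) := by
  unfold Pre_biggestProductSeries; infer_instance
def pvWitness_biggestProductSeries : List Int × Int := ([2, 3], 2)

def Spec_biggestProductSeries (number : List Int) (k : Int) (out : Int) : Prop :=
  out = biggestProductSeries_alt number k
instance (number : List Int) (k : Int) (out : Int) :
    Decidable (Spec_biggestProductSeries number k out) := by
  unfold Spec_biggestProductSeries; infer_instance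

-- ===== CLAIM (what is proved, stated in full; the proofs are below) =====
def Claim_equal_biggestProductSeries : Prop :=
  ∀ (number : List Int) (k : Int), Dom_biggestProductSeries number k →
    Pre_biggestProductSeries number k →
    Spec_biggestProductSeries number k (biggestProductSeries number k)

-- ===== LEMMAS AND PROOFS =====

-- window of length K starting at s
def win (number : List Int) (K : Nat) (s : Nat) : List Int := (number.drop s).take K

-- one step of B, over Nat indices
def pstep (number : List Int) (K : Nat) (m : Int) (t : Nat) : Int :=
  let w := win number K t
  if w.contains 0 then m
  else
    let p := w.foldl (fun p x => p * x) 1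
    if p > m then p else m

-- B's accumulator after all windows contained in the length-j prefix
def bestUpTo (number : List Int) (K : Nat) (j : Nat) : Int :=
  (List.range (j + 1 - K)).foldl (pstep number K) 0

lemma bestUpTo_zero (number : List Int) (K : Nat) (hK : 1 ≤ K) :
    bestUpTo number K 0 = 0 := by
  unfold bestUpTo
  have h : 0 + 1 - K = 0 := by omega
  rw [h]; rfl

lemma bestUpTo_succ_small (number : List Int) (K j : Nat) (h : j + 1 < K) :
    bestUpTo number K (j + 1) = bestUpTo number K j := by
  unfold bestUpTo
  have h1 : j + 1 + 1 - K = 0 := by omega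
  have h2 : j + 1 - K = 0 := by omega
  rw [h1, h2]

lemma bestUpTo_succ (number : List Int) (K j : Nat) (h : K ≤ j + 1) :
    bestUpTo number K (j + 1) = pstep number K (bestUpTo number K j) (j + 1 - K) := by
  unfold bestUpTo
  have h1 : j + 1 + 1 - K = (j + 1 - K) + 1 := by omega
  rw [h1, List.range_succ, List.foldl_append, List.foldl_cons, List.foldl_nil]

lemma getD_mid (l r : List Int) (y d : Int) : (l ++ y :: r).getD l.length d = y := by
  induction l with
  | nil => rfl
  | cons a l ih => simpa using ih

lemma zero_mem_win (number : List Int) (K s t : Nat) (h1 : s ≤ t) (h2 : t < s + K)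
    (h3 : t < number.length) (h0 : number.getD t 1 = 0) : (0 : Int) ∈ win number K s := by
  have hsome : number[t]? = some 0 := by
    rw [List.getElem?_eq_getElem h3]
    have := List.getD_eq_getElem number 1 h3
    rw [h0] at this; rw [← this]
  have hwin : (win number K s)[t - s]? = some 0 := by
    unfold win
    rw [List.getElem?_take, if_pos (by omega : t - s < K)]
    rw [List.getElem?_drop]
    have : s + (t - s) = t := by omega
    rw [this]; exact hsome
  exact List.mem_of_getElem? hwin

lemma pstep_skip (number : List Int) (K : Nat) (m : Int) (t : Nat)
    (h : (0 : Int) ∈ win number K t) : pstep number K m t = m := by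
  simp [pstep, h]

lemma foldl_mul_eq_prod (l : List Int) : l.foldl (fun p x => p * x) 1 = l.prod := by
  rw [List.prod_eq_foldl]

lemma pstep_hit (number : List Int) (K : Nat) (m : Int) (t : Nat)
    (h : (0 : Int) ∉ win number K t) :
    pstep number K m t =
      if (win number K t).prod > m then (win number K t).prod else m := by
  simp [pstep, h, foldl_mul_eq_prod]

lemma stepA_zero (number : List Int) (k cp ic piv prod maxP i : Int) (h : i = 0) :
    stepA number k (cp, ic, piv, prod, maxP) i = (0, ic + 1, piv, 1, maxP) := by
  simp [stepA, h]

lemma stepA_lt (number : List Int) (k cp ic piv prod maxP i : Int) (hi : i ≠ 0)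
    (hcp : cp < k) :
    stepA number k (cp, ic, piv, prod, maxP) i =
      (cp + 1, ic + 1, (if cp = 0 then ic else piv), prod * i,
        if cp + 1 = k then (if prod * i > maxP then prod * i else maxP) else maxP) := by
  simp [stepA, hi, hcp]

lemma stepA_ge (number : List Int) (k cp ic piv prod maxP i : Int) (hi : i ≠ 0)
    (hcp : ¬ cp < k) (hcp0 : cp ≠ 0) :
    stepA number k (cp, ic, piv, prod, maxP) i =
      (cp, ic + 1, piv + 1,
        PySem.Int.floordiv prod (PySem.List.pyGetD number piv 0) * i,
        if PySem.Int.floordiv prod (PySem.List.pyGetD number piv 0) * i > maxP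
          then PySem.Int.floordiv prod (PySem.List.pyGetD number piv 0) * i else maxP) := by
  simp [stepA, hi, hcp, hcp0]

lemma loopA_inv (number : List Int) (k : Int) (K : Nat) (hK : k = (K : Int)) (hK1 : 1 ≤ K) :
    ∀ (rest pre0 run : List Int) (piv maxP : Int),
      number = pre0 ++ (run ++ rest) →
      (∀ x ∈ run, x ≠ 0) →
      (pre0.getLast? = some (0 : Int) ∨ run.length = K ∨ pre0 = []) →
      run.length ≤ K →
      (run = [] ∨ piv = (pre0.length : Int)) →
      maxP = bestUpTo number K (pre0.length + run.length) →
      (rest.foldl (stepA number k)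
        ((run.length : Int), ((pre0.length + run.length : Nat) : Int), piv, run.prod, maxP)).2.2.2.2
        = bestUpTo number K number.length := by
  intro rest
  induction rest with
  | nil =>
    intro pre0 run piv maxP hsplit _ _ _ _ hmax
    simp only [List.foldl_nil]
    rw [hmax, hsplit]
    simp
  | cons x rest' ih =>
    intro pre0 run piv maxP hsplit hnz hmaxi hlen hpiv hmax
    have hjlt : pre0.length + run.length < number.length := by
      rw [hsplit]; simp
    by_cases hx : x = 0
    · -- the run is broken: restart with an empty run
      rw [List.foldl_cons, stepA_zero number k _ _ _ _ _ _ hx]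
      have h6 : maxP = bestUpTo number K ((pre0 ++ run ++ [x]).length + ([] : List Int).length) := by
        have hsp2 : number = (pre0 ++ run) ++ x :: rest' := by rw [hsplit]; simp
        have hlen2 : (pre0 ++ run ++ [x]).length + ([] : List Int).length
            = (pre0.length + run.length) + 1 := by simp; omega
        rw [hlen2]
        by_cases hwj : K ≤ pre0.length + run.length + 1
        · have hz : (0 : Int) ∈ win number K (pre0.length + run.length + 1 - K) := by
            apply zero_mem_win number K _ (pre0.length + run.length) (by omega) (by omega) hjlt
            rw [hsp2]
            have := getD_mid (pre0 ++ run) rest' x 1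
            simpa [hx] using this
          rw [bestUpTo_succ number K _ hwj, pstep_skip _ _ _ _ hz]
          exact hmax
        · rw [bestUpTo_succ_small number K _ (by omega)]; exact hmax
      have hst : ((0 : Int), ((pre0.length + run.length : Nat) : Int) + 1, piv, (1 : Int), maxP)
          = (((([] : List Int).length : Nat) : Int),
             (((pre0 ++ run ++ [x]).length + ([] : List Int).length : Nat) : Int), piv,
             ([] : List Int).prod, maxP) := by
        simp [Prod.ext_iff]; push_cast; ring
      rw [hst]
      exact ih (pre0 ++ run ++ [x]) [] piv maxP (by rw [hsplit]; simp)
        (by simp) (Or.inl (by simp [hx])) (by simp) (Or.inl rfl) h6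
    · by_cases hlt : run.length < K
      · -- growing window
        have hcp : ((run.length : Nat) : Int) < k := by rw [hK]; exact_mod_cast hlt
        rw [List.foldl_cons, stepA_lt number k _ _ _ _ _ _ hx hcp]
        have hnz' : ∀ y ∈ run ++ [x], y ≠ 0 := by
          intro y hy; rcases List.mem_append.1 hy with h | h
          · exact hnz y h
          · simp at h; subst h; exact hx
        have hpiv' : (if ((run.length : Nat) : Int) = 0 then ((pre0.length + run.length : Nat) : Int) else piv)
            = ((pre0.length : Nat) : Int) := by
          rcases hr : run with _ | ⟨a, t⟩
          · simp
          · have hne : (((a :: t).length : Nat) : Int) ≠ 0 := by push_cast [List.length_cons]; omega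
            rw [if_neg hne]
            rcases hpiv with h' | h'
            · rw [hr] at h'; simp at h'
            · exact h'
        have h3 : (pre0.getLast? = some (0 : Int) ∨ (run ++ [x]).length = K ∨ pre0 = []) := by
          rcases hmaxi with h | h | h
          · exact Or.inl h
          · exact absurd h (by omega)
          · exact Or.inr (Or.inr h)
        have h6 : (if ((run.length : Nat) : Int) + 1 = k
              then (if run.prod * x > maxP then run.prod * x else maxP) else maxP)
            = bestUpTo number K (pre0.length + (run ++ [x]).length) := by
          have hlen3 : pre0.length + (run ++ [x]).length = (pre0.length + run.length) + 1 := by simp; omega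
          rw [hlen3]
          by_cases hKeq : run.length + 1 = K
          · have hcond : ((run.length : Nat) : Int) + 1 = k := by rw [hK]; exact_mod_cast hKeq
            rw [if_pos hcond]
            have hwj : K ≤ pre0.length + run.length + 1 := by omega
            rw [bestUpTo_succ number K _ hwj]
            have hs : pre0.length + run.length + 1 - K = pre0.length := by omega
            have hwin : win number K pre0.length = run ++ [x] := by
              unfold win
              have : number = pre0 ++ ((run ++ [x]) ++ rest') := by rw [hsplit]; simp
              rw [this, List.drop_left, List.take_left' (by simp; omega)]
            rw [hs, pstep_hit]
            · rw [hwin, hmax]; simp [List.prod_append]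
            · rw [hwin]; intro hc; exact hnz' 0 hc rfl
          · have hcond : ¬ ((run.length : Nat) : Int) + 1 = k := by
              rw [hK]; intro hc; apply hKeq; exact_mod_cast hc
            rw [if_neg hcond]
            by_cases hwj : K ≤ pre0.length + run.length + 1
            · -- the window ending here crosses the zero just left of the run
              have hpre0 : pre0.getLast? = some (0 : Int) := by
                rcases hmaxi with h | h | h
                · exact h
                · exact absurd h (by omega)
                · exfalso; apply hKeq; subst h; simp at hwj ⊢; omega
              obtain ⟨q, hq⟩ := List.getLast?_eq_some_iff.1 hpre0
              have hq1 : pre0.length = q.length + 1 := by rw [hq]; simp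
              have hz : (0 : Int) ∈ win number K (pre0.length + run.length + 1 - K) := by
                apply zero_mem_win number K _ q.length (by omega) (by omega) (by omega)
                have hq2 : number = q ++ (0 : Int) :: (run ++ x :: rest') := by
                  rw [hsplit, hq]; simp
                rw [hq2, getD_mid]
              rw [bestUpTo_succ number K _ hwj, pstep_skip _ _ _ _ hz]
              exact hmax
            · rw [bestUpTo_succ_small number K _ (by omega)]; exact hmax
          -- close the let-state and recurse
        rw [hpiv']
        have hst : (((run.length : Nat) : Int) + 1, ((pre0.length + run.length : Nat) : Int) + 1,
              ((pre0.length : Nat) : Int), run.prod * x,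
              bestUpTo number K (pre0.length + (run ++ [x]).length))
            = ((((run ++ [x]).length : Nat) : Int),
               (((pre0.length + (run ++ [x]).length : Nat)) : Int), ((pre0.length : Nat) : Int),
               (run ++ [x]).prod, bestUpTo number K (pre0.length + (run ++ [x]).length)) := by
          simp [Prod.ext_iff, List.prod_append]; push_cast; ring
        rw [h6, hst]
        exact ih pre0 (run ++ [x]) _ _ (by rw [hsplit]; simp) hnz' h3 (by simp; omega)
          (Or.inr rfl) rfl
      · -- full window: slide it
        have hcpK : run.length = K := by omega
        rcases run with _ | ⟨h, t⟩
        · simp at hcpK; omega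
        have hh : h ≠ 0 := hnz h (by simp)
        have hpivv : piv = ((pre0.length : Nat) : Int) := by
          rcases hpiv with h' | h'; · simp at h'
          · exact h'
        have hcp : ¬ (((h :: t).length : Nat) : Int) < k := by
          rw [hK]; push_cast; simp at hcpK; omega
        have hcp0 : (((h :: t).length : Nat) : Int) ≠ 0 := by push_cast; omega
        rw [List.foldl_cons, stepA_ge number k _ _ _ _ _ _ hx hcp hcp0]
        have hget : PySem.List.pyGetD number piv 0 = h := by
          rw [hpivv, PySem.List.pyGetD_natCast]
          have : number = pre0 ++ h :: (t ++ x :: rest') := by rw [hsplit]; simp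
          rw [this, getD_mid]
        have hdiv : PySem.Int.floordiv (h :: t).prod (PySem.List.pyGetD number piv 0) = t.prod := by
          rw [hget, List.prod_cons]
          exact Int.mul_fdiv_cancel_left t.prod hh
        rw [hdiv]
        have h6 : (if t.prod * x > maxP then t.prod * x else maxP)
            = bestUpTo number K ((pre0 ++ [h]).length + (t ++ [x]).length) := by
          have hlen3 : (pre0 ++ [h]).length + (t ++ [x]).length
              = (pre0.length + (h :: t).length) + 1 := by simp; omega
          rw [hlen3]
          have hwj : K ≤ pre0.length + (h :: t).length + 1 := by simp at hcpK; omega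
          rw [bestUpTo_succ number K _ hwj]
          have hs : pre0.length + (h :: t).length + 1 - K = pre0.length + 1 := by
            simp at hcpK; omega
          have hwin : win number K (pre0.length + 1) = t ++ [x] := by
            unfold win
            have : number = (pre0 ++ [h]) ++ ((t ++ [x]) ++ rest') := by rw [hsplit]; simp
            rw [this]
            have hl : (pre0 ++ [h]).length = pre0.length + 1 := by simp
            rw [← hl, List.drop_left, List.take_left' (by simp at hcpK ⊢; omega)]
          rw [hs, pstep_hit]
          · rw [hwin, hmax]; simp [List.prod_append]
          · rw [hwin]; intro hc
            rcases List.mem_append.1 hc with hc | hc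
            · exact hnz 0 (by simp [hc]) rfl
            · simp at hc; exact hx hc.symm
        have hst : ((((h :: t).length : Nat) : Int),
              ((pre0.length + (h :: t).length : Nat) : Int) + 1, piv + 1, t.prod * x,
              bestUpTo number K ((pre0 ++ [h]).length + (t ++ [x]).length))
            = ((((t ++ [x]).length : Nat) : Int),
               (((pre0 ++ [h]).length + (t ++ [x]).length : Nat) : Int),
               (((pre0 ++ [h]).length : Nat) : Int), (t ++ [x]).prod,
               bestUpTo number K ((pre0 ++ [h]).length + (t ++ [x]).length)) := by
          rw [hpivv]; simp [Prod.ext_iff, List.prod_append]; push_cast; ring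
        rw [h6, hst]
        refine ih (pre0 ++ [h]) (t ++ [x]) _ _ (by rw [hsplit]; simp) ?_ ?_ ?_ (Or.inr rfl) rfl
        · intro y hy; rcases List.mem_append.1 hy with hc | hc
          · exact hnz y (by simp [hc])
          · simp at hc; subst hc; exact hx
        · exact Or.inr (Or.inl (by simp at hcpK ⊢; omega))
        · simp at hcpK ⊢; omega

lemma alt_eq (number : List Int) (k : Int) (K : Nat) (hK : k = (K : Int)) :
    biggestProductSeries_alt number k = bestUpTo number K number.length := by
  subst hK
  unfold biggestProductSeries_alt bestUpTo
  rw [PySem.List.pyRange_one]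
  have h1 : (((number.length : Int) - (K : Int) + 1) - 0).toNat = number.length + 1 - K := by
    omega
  rw [h1, List.foldl_map]
  apply List.foldl_ext
  intro m t _
  simp only [zero_add, PySem.List.slice_natCast_add, pstep, win]

-- ===== VERDICT (by name: the statement is the Claim_ definition above) =====
theorem biggestProductSeries_spec : Claim_equal_biggestProductSeries := by
  intro number k _ hpre
  have hk : 1 ≤ k := hpre
  obtain ⟨K, hK⟩ : ∃ K : Nat, k = (K : Int) := ⟨k.toNat, by omega⟩
  have hK1 : 1 ≤ K := by omega
  show biggestProductSeries number k = biggestProductSeries_alt number k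
  rw [alt_eq number k K hK]
  unfold biggestProductSeries
  have h := loopA_inv number k K hK hK1 number [] [] 0 0 (by simp) (by simp)
    (Or.inr (Or.inr rfl)) (by simp) (Or.inl rfl)
    (by simpa using (bestUpTo_zero number K hK1).symm)
  simpa using h
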